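-- pv_equiv track=rewrite | github.com/City-of-Helsinki/tilavarauspalvelu-core | utils/elasticsearch.py | parse_search_words
-- ===== SOURCE A (Python) =====
-- def parse_search_words(words: list[str]) -> str:
--     """
--     Search words are split with spaces and should be treated as the same search => AND.
--
--     The first word should begin with asterisk, and the last word should end with asterisk.
--     If there are multiple words, they should all be wrapped in parentheses.
--
--     Examples:
--         >>> parse_search_words(["Word"])
--         >>> "(*Word*)"
--
--         >>> parse_search_words(["First", "Last"])
--         >>> "((*First) AND (Last*))"
--
--         >>> parse_search_words(["First", "Middle", "Last"])
--         >>> "((*First) AND (Middle) AND (Last*))"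
--     """
--     if len(words) == 1:
--         return f"(*{words[0]}*)"
--
--     all_and_query_strings: list[str] = []
--     for i, word in enumerate(words):
--         if i == 0:
--             # Add asterisk to the first word
--             all_and_query_strings.append(f"(*{word})")
--         elif i == len(words) - 1:
--             # Add asterisk to the last word
--             all_and_query_strings.append(f"({word}*)")
--         else:
--             all_and_query_strings.append(f"({word})")
--
--     query_str = " AND ".join(all_and_query_strings)
--     return f"({query_str})"
-- ===== SOURCE B (Python) =====
-- def parse_search_words(words: list[str]) -> str:
--     # Template formulation: no per-word wrapping at all -- the parentheses,
--     # asterisks and separators all live in one template around a plain join.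
--     if not words:
--         return "()"
--     if len(words) == 1:
--         return f"(*{words[0]}*)"
--     return "((*" + ") AND (".join(words) + "*))"
-- ===== Notes on version B (the rewrite author's own statement) =====
-- stated objective: simpler
-- what changed: Replaces A's enumerate loop that wraps each word per index position into a list and joins the wrapped tokens by a single template: the words are joined raw with the separator ') AND (' and all parentheses/asterisks come from the outer wrapper '((*...*))'.
import Mathlib
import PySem

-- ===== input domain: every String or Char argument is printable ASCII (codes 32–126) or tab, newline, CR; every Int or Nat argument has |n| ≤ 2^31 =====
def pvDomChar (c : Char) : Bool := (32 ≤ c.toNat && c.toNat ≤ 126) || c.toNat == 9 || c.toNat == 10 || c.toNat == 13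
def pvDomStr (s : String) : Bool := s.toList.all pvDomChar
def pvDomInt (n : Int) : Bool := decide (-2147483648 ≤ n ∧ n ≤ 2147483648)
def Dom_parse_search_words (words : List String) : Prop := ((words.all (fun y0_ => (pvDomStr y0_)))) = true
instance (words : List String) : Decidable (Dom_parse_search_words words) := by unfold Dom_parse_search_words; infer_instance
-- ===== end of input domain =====

-- B replaces A's per-index wrapping loop + join by a single template:
-- join the raw words with ") AND (" and put all parentheses/asterisks in the
-- outer wrapper (objective: simpler).

-- ===== PORT A =====
def parse_search_words (words : List String) : String :=
  if words.length = 1 then "(*" ++ words.headI ++ "*)"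
  else
    let all_and_query_strings : List String :=
      (PySem.List.enumerate words).foldl
        (fun acc iw =>
          if iw.1 = 0 then acc ++ ["(*" ++ iw.2 ++ ")"]
          else if iw.1 = (words.length : Int) - 1 then acc ++ ["(" ++ iw.2 ++ "*)"]
          else acc ++ ["(" ++ iw.2 ++ ")"]) []
    let query_str := PySem.Str.join " AND " all_and_query_strings
    "(" ++ query_str ++ ")"

-- ===== PORT B =====
def parse_search_words_alt (words : List String) : String :=
  match words with
  | [] => "()"
  | [w] => "(*" ++ w ++ "*)"
  | _ :: _ :: _ => "((*" ++ PySem.Str.join ") AND (" words ++ "*))"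

-- ===== PRECONDITION & SPEC =====
def Spec_parse_search_words (words : List String) (out : String) : Prop := out = parse_search_words_alt words
instance (words : List String) (out : String) : Decidable (Spec_parse_search_words words out) := by unfold Spec_parse_search_words; infer_instance

-- ===== CLAIM (what is proved, stated in full; the proofs are below) =====
def Claim_equal_parse_search_words : Prop := ∀ (words : List String), Dom_parse_search_words words → Spec_parse_search_words words (parse_search_words words)

-- ===== LEMMAS AND PROOFS =====

-- A's loop body (parametric in the total length n)
def pswBody (n : Int) (acc : List String) (iw : Int × String) : List String :=
  if iw.1 = 0 then acc ++ ["(*" ++ iw.2 ++ ")"]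
  else if iw.1 = n - 1 then acc ++ ["(" ++ iw.2 ++ "*)"]
  else acc ++ ["(" ++ iw.2 ++ ")"]

-- A's loop on the tail (indices ≥ 1) produces the middle segment plus the starred last word.
lemma psw_tail_fold (rest : List String) : ∀ (acc : List String) (k n : Int),
    rest ≠ [] → 1 ≤ k → k + rest.length = n →
    (PySem.List.enumerate rest k).foldl (pswBody n) acc =
      acc ++ rest.dropLast.map (fun x => "(" ++ x ++ ")") ++ ["(" ++ rest.getLast! ++ "*)"] := by
  induction rest with
  | nil => intro _ _ _ h; exact absurd rfl h
  | cons x t ih =>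
    intro acc k n _ hk hn
    cases t with
    | nil =>
      have hx : k = n - 1 := by simp at hn; omega
      simp [PySem.List.enumerate_cons, PySem.List.enumerate_nil, pswBody, hx]
      omega
    | cons y t' =>
      have hne : (1 : Int) ≤ k + 1 := by omega
      have hlen : (k + 1) + ((y :: t').length : Int) = n := by
        simp at hn ⊢; omega
      have hk0 : ¬ (k = 0) := by omega
      have hklast : ¬ (k = n - 1) := by simp at hn; omega
      rw [PySem.List.enumerate_cons]
      simp only [List.foldl_cons]
      rw [show pswBody n acc (k, x) = acc ++ ["(" ++ x ++ ")"] by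
        simp [pswBody, hk0, hklast]]
      rw [ih (acc ++ ["(" ++ x ++ ")"]) (k + 1) n (by simp) hne hlen]
      simp [List.getLast!, List.getLast]

lemma psw_join_cons (s t : String) (l : List String) :
    PySem.Str.join " AND " (s :: t :: l) = s ++ " AND " ++ PySem.Str.join " AND " (t :: l) := by
  apply String.toList_injective
  simp [PySem.Str.join, PySem.Chars.join_cons_cons]

-- joining the wrapped-middle + starred-last token list = "(" ++ raw join ++ "*)"
lemma psw_join_tail (rest : List String) : rest ≠ [] →
    PySem.Str.join " AND "
      (rest.dropLast.map (fun x => "(" ++ x ++ ")") ++ ["(" ++ rest.getLast! ++ "*)"]) =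
      "(" ++ PySem.Str.join ") AND (" rest ++ "*)" := by
  induction rest with
  | nil => intro h; exact absurd rfl h
  | cons x t ih =>
    intro _
    cases t with
    | nil =>
      apply String.toList_injective
      simp [PySem.Str.join, PySem.Chars.join_singleton]
    | cons y t' =>
      have hmid : (x :: y :: t').dropLast.map (fun x => "(" ++ x ++ ")") ++
          ["(" ++ (x :: y :: t').getLast! ++ "*)"] =
          ("(" ++ x ++ ")") :: ((y :: t').dropLast.map (fun x => "(" ++ x ++ ")") ++
            ["(" ++ (y :: t').getLast! ++ "*)"]) := by
        simp [List.getLast!, List.getLast]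
      rw [hmid]
      obtain ⟨h, l, hE⟩ := List.exists_cons_of_ne_nil
        (l := (y :: t').dropLast.map (fun x => "(" ++ x ++ ")") ++
          ["(" ++ (y :: t').getLast! ++ "*)"]) (by simp)
      rw [hE, psw_join_cons, ← hE, ih (by simp)]
      apply String.toList_injective
      simp [PySem.Str.join, PySem.Chars.join_cons_cons]

-- ===== VERDICT (by name: the statement is the Claim_ definition above) =====
theorem parse_search_words_spec : Claim_equal_parse_search_words := by
  intro words _
  unfold Spec_parse_search_words
  match words with
  | [] => decide
  | [w] => simp [parse_search_words, parse_search_words_alt]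
  | w :: y :: t =>
    have hlen : ¬ ((w :: y :: t).length = 1) := by simp
    unfold parse_search_words parse_search_words_alt
    rw [if_neg hlen]
    rw [PySem.List.enumerate_cons]
    simp only [List.foldl_cons]
    have hfirst :
        (fun acc (iw : Int × String) =>
          if iw.1 = 0 then acc ++ ["(*" ++ iw.2 ++ ")"]
          else if iw.1 = ((w :: y :: t).length : Int) - 1 then acc ++ ["(" ++ iw.2 ++ "*)"]
          else acc ++ ["(" ++ iw.2 ++ ")"]) = pswBody ((w :: y :: t).length : Int) := by
      funext acc iw; simp [pswBody]
    rw [hfirst]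
    simp only [if_true, List.nil_append]
    rw [psw_tail_fold (y :: t) ["(*" ++ w ++ ")"] (0 + 1) ((w :: y :: t).length : Int)
      (by simp) (by norm_num) (by simp; omega)]
    obtain ⟨h, l, hE⟩ := List.exists_cons_of_ne_nil
      (l := (y :: t).dropLast.map (fun x => "(" ++ x ++ ")") ++
        ["(" ++ (y :: t).getLast! ++ "*)"]) (by simp)
    rw [List.append_assoc, hE, List.singleton_append, psw_join_cons, ← hE,
      psw_join_tail (y :: t) (by simp)]
    apply String.toList_injective
    simp [PySem.Str.join, PySem.Chars.join_cons_cons]
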